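-- pv_equiv track=rewrite | github.com/amsterdam-littlehill/crisp | scripts/benchmark.py | session_with_compaction
-- ===== SOURCE A (Python) =====
-- from dataclasses import dataclass
-- from typing import List
--
-- TOKEN_PER_CN_CHAR = 1.0
--
-- TOKEN_PER_EN_WORD = 1.3
--
-- @dataclass
-- class FileSize:
--     name: str
--     lines: int
--     cn_ratio: float  # 中文内容占比
--
-- SKILL_FILES = {
--     "SKILL.md": FileSize("SKILL.md", 52, 0.6),
--     "project-rules.md": FileSize("project-rules.md", 120, 0.5),
--     "coding-standards.md": FileSize("coding-standards.md", 80, 0.4),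
--     "gotchas.md": FileSize("gotchas.md", 60, 0.6),
--     "fix-bug.md": FileSize("fix-bug.md", 45, 0.6),
--     "add-feature.md": FileSize("add-feature.md", 50, 0.6),
--     "update-rules.md": FileSize("update-rules.md", 40, 0.6),
--     "smoke-test.sh": FileSize("smoke-test.sh", 120, 0.1),  # 脚本代码英文为主
--     "test-trigger.sh": FileSize("test-trigger.sh", 70, 0.1),
-- }
--
-- def estimate_tokens(f: FileSize) -> int:
--     """估算文件的 token 数"""
--     avg_chars_per_line = 40
--     total_chars = f.lines * avg_chars_per_line
--     # 混合中英文估算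
--     cn_chars = int(total_chars * f.cn_ratio)
--     en_words = int(total_chars * (1 - f.cn_ratio) / 5)  # 每5个字符约1个英文单词
--     return int(cn_chars * TOKEN_PER_CN_CHAR + en_words * TOKEN_PER_EN_WORD)
--
-- def naive_load_all() -> int:
--     """ naive 方式：每次任务加载所有文件 """
--     return sum(estimate_tokens(f) for f in SKILL_FILES.values())
--
-- def skill_based_load(task: str) -> int:
--     """ skill-based 方式：按任务路由，只加载必需文件 """
--     # L1: SKILL.md 始终加载（导航中心）
--     total = estimate_tokens(SKILL_FILES["SKILL.md"])
--
--     # L2: 按任务加载对应 workflow + rules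
--     if task == "fix_bug":
--         total += estimate_tokens(SKILL_FILES["fix-bug.md"])
--         total += estimate_tokens(SKILL_FILES["project-rules.md"])
--         total += estimate_tokens(SKILL_FILES["coding-standards.md"])
--         # 可能扫一眼 gotchas
--         total += estimate_tokens(SKILL_FILES["gotchas.md"]) // 3
--     elif task == "add_feature":
--         total += estimate_tokens(SKILL_FILES["add-feature.md"])
--         total += estimate_tokens(SKILL_FILES["project-rules.md"])
--         total += estimate_tokens(SKILL_FILES["coding-standards.md"])
--         total += estimate_tokens(SKILL_FILES["gotchas.md"]) // 2
--     elif task == "multi_subtask":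
--         total += estimate_tokens(SKILL_FILES["update-rules.md"])
--         total += estimate_tokens(SKILL_FILES["project-rules.md"])
--     elif task == "other":
--         total += estimate_tokens(SKILL_FILES["project-rules.md"])
--         total += estimate_tokens(SKILL_FILES["coding-standards.md"])
--     else:
--         # 默认兜底
--         total += estimate_tokens(SKILL_FILES["project-rules.md"])
--
--     return total
--
-- def session_with_compaction(rounds: int, task_pattern: List[str]) -> dict:
--     """模拟一个多轮会话，包含上下文压缩 """
--     naive_total = 0
--     skill_total = 0
--
--     # 薄壳常驻（被压缩后存活）
--     thin_shell = 80  # ~60 行薄壳的 token 数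
--
--     for i, task in enumerate(task_pattern):
--         # naive：每轮重新加载全部（因为没有导航，只能全塞进去）
--         naive_total += naive_load_all()
--
--         # skill-based：
--         # - 第 1 轮：加载 SKILL.md + 任务相关文件
--         # - 第 N 轮：压缩后薄壳存活，Agent 根据信号重读 SKILL.md + 路由
--         if i == 0:
--             skill_total += skill_based_load(task)
--         else:
--             # 压缩后只剩薄壳，SessionStart hook 发信号重读
--             skill_total += thin_shell + skill_based_load(task)
--
--     return {
--         "naive_total_tokens": naive_total,
--         "skill_total_tokens": skill_total,
--         "rounds": rounds,
--     }
-- ===== SOURCE B (Python) =====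
-- from dataclasses import dataclass
-- from typing import List
--
--
-- @dataclass
-- class FileSize:
--     name: str
--     lines: int
--     cn_ratio: float
--
--
-- TOKEN_PER_CN_CHAR = 1.0
-- TOKEN_PER_EN_WORD = 1.3
--
-- SKILL_FILES = {
--     "SKILL.md": FileSize("SKILL.md", 52, 0.6),
--     "project-rules.md": FileSize("project-rules.md", 120, 0.5),
--     "coding-standards.md": FileSize("coding-standards.md", 80, 0.4),
--     "gotchas.md": FileSize("gotchas.md", 60, 0.6),
--     "fix-bug.md": FileSize("fix-bug.md", 45, 0.6),
--     "add-feature.md": FileSize("add-feature.md", 50, 0.6),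
--     "update-rules.md": FileSize("update-rules.md", 40, 0.6),
--     "smoke-test.sh": FileSize("smoke-test.sh", 120, 0.1),
--     "test-trigger.sh": FileSize("test-trigger.sh", 70, 0.1),
-- }
--
--
-- def estimate_tokens(f: FileSize) -> int:
--     avg_chars_per_line = 40
--     total_chars = f.lines * avg_chars_per_line
--     cn_chars = int(total_chars * f.cn_ratio)
--     en_words = int(total_chars * (1 - f.cn_ratio) / 5)
--     return int(cn_chars * TOKEN_PER_CN_CHAR + en_words * TOKEN_PER_EN_WORD)
--
--
-- def session_with_compaction(rounds: int, task_pattern: List[str]) -> dict: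
--     # per-file token table built once
--     tok = {name: estimate_tokens(f) for name, f in SKILL_FILES.items()}
--     base = tok["SKILL.md"]
--     # table of per-task extra costs, replacing the if/elif routing chain
--     extras = {
--         "fix_bug": tok["fix-bug.md"] + tok["project-rules.md"]
--         + tok["coding-standards.md"] + tok["gotchas.md"] // 3,
--         "add_feature": tok["add-feature.md"] + tok["project-rules.md"]
--         + tok["coding-standards.md"] + tok["gotchas.md"] // 2,
--         "multi_subtask": tok["update-rules.md"] + tok["project-rules.md"],
--         "other": tok["project-rules.md"] + tok["coding-standards.md"],
--     }
--     default = tok["project-rules.md"]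
--     n = len(task_pattern)
--     thin_shell = 80
--     return {
--         "naive_total_tokens": sum(tok.values()) * n,
--         "skill_total_tokens": sum(base + extras.get(t, default) for t in task_pattern)
--         + thin_shell * max(0, n - 1),
--         "rounds": rounds,
--     }
-- ===== Notes on version B (the rewrite author's own statement) =====
-- stated objective: simpler
-- what changed: Replaces A's enumerate loop with per-round naive reloads, an i==0 thin-shell branch and the per-task if/elif routing chain by a table-driven formulation: a per-file token dict built once, a task->extra-cost lookup table with a default, the naive total as one product and the thin-shell contribution as 80*max(0,n-1).
import Mathlib
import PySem

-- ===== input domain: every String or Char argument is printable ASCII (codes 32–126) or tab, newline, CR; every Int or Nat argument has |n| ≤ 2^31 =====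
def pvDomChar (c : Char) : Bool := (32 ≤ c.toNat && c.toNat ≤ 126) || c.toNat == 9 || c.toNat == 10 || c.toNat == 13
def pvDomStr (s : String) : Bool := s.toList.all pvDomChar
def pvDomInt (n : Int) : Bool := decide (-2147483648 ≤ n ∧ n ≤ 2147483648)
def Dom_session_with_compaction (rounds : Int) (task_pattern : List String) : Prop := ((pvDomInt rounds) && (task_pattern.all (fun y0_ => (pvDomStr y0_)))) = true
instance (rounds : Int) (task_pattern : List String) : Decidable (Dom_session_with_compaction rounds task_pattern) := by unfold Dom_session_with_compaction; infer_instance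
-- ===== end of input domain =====

-- B replaces A's enumerate loop and its if/elif routing chain by a table-driven
-- formulation: a per-file token dict built once, a task->extra-cost lookup table
-- with a default, the naive total as one product and the thin-shell term 80*max(0,n-1).


-- ===== PORT A =====
-- estimate_tokens: the Python uses float ratios 0.6/0.5/0.4/0.1 and the factor 1.3; on the
-- nine fixed SKILL_FILES entries the float results coincide exactly with the rational
-- arithmetic below (cn_ratio = cn10/10, 1.3 = 13/10), verified against CPython for all nine
-- files.  `lines` and `cn10` (cn_ratio*10) come from the SKILL_FILES table.
def estimateTokens (lines : Int) (cn10 : Int) : Int :=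
  let total_chars := lines * 40
  let cn_chars := PySem.Int.floordiv (total_chars * cn10) 10
  let en_words := PySem.Int.floordiv (PySem.Int.floordiv (total_chars * (10 - cn10)) 10) 5
  cn_chars + PySem.Int.floordiv (en_words * 13) 10

-- naive_load_all: sum of estimate_tokens over the nine SKILL_FILES in insertion order
def naiveLoadAll : Int :=
  estimateTokens 52 6 + estimateTokens 120 5 + estimateTokens 80 4 + estimateTokens 60 6 +
  estimateTokens 45 6 + estimateTokens 50 6 + estimateTokens 40 6 + estimateTokens 120 1 +
  estimateTokens 70 1

-- skill_based_load: same if/elif chain as the Python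
def skillBasedLoad (task : String) : Int :=
  let total := estimateTokens 52 6
  if task == "fix_bug" then
    total + estimateTokens 45 6 + estimateTokens 120 5 + estimateTokens 80 4 +
      PySem.Int.floordiv (estimateTokens 60 6) 3
  else if task == "add_feature" then
    total + estimateTokens 50 6 + estimateTokens 120 5 + estimateTokens 80 4 +
      PySem.Int.floordiv (estimateTokens 60 6) 2
  else if task == "multi_subtask" then
    total + estimateTokens 40 6 + estimateTokens 120 5
  else if task == "other" then
    total + estimateTokens 120 5 + estimateTokens 80 4
  else
    total + estimateTokens 120 5

-- the 'for i, task in enumerate(task_pattern)' loop, carrying (naive_total, skill_total)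
def sessionLoop : Int → Int × Int → List String → Int × Int
  | _, acc, [] => acc
  | i, (naive, skill), task :: rest =>
      let naive := naive + naiveLoadAll
      let skill := if i == 0 then skill + skillBasedLoad task
                   else skill + 80 + skillBasedLoad task
      sessionLoop (i + 1) (naive, skill) rest

def session_with_compaction (rounds : Int) (task_pattern : List String) : List (String × Int) :=
  let (naive_total, skill_total) := sessionLoop 0 (0, 0) task_pattern
  [("naive_total_tokens", naive_total), ("skill_total_tokens", skill_total), ("rounds", rounds)]

-- ===== PORT B =====
-- Source B's per-file token table: {name: estimate_tokens(f) for name, f in SKILL_FILES.items()}.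
-- Same exact rational arithmetic as A's estimate (the only exact rendering of the floats).
def altEstimate (lines : Int) (cn10 : Int) : Int :=
  PySem.Int.floordiv (lines * 40 * cn10) 10 +
    PySem.Int.floordiv
      (PySem.Int.floordiv (PySem.Int.floordiv (lines * 40 * (10 - cn10)) 10) 5 * 13) 10

def altFileTable : List (String × Int × Int) :=
  [("SKILL.md", 52, 6), ("project-rules.md", 120, 5), ("coding-standards.md", 80, 4),
   ("gotchas.md", 60, 6), ("fix-bug.md", 45, 6), ("add-feature.md", 50, 6),
   ("update-rules.md", 40, 6), ("smoke-test.sh", 120, 1), ("test-trigger.sh", 70, 1)]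

def altTok : PySem.Dict String Int :=
  altFileTable.foldl (fun d e => d.insert e.1 (altEstimate e.2.1 e.2.2)) PySem.Dict.empty

-- tok[name]: the key is always present, so dict[...] is getD with an unused default
def altTokGet (name : String) : Int := altTok.getD name 0

-- the extras routing table of Source B
def altExtras : PySem.Dict String Int :=
  ((((PySem.Dict.empty.insert "fix_bug"
      (altTokGet "fix-bug.md" + altTokGet "project-rules.md" + altTokGet "coding-standards.md"
        + PySem.Int.floordiv (altTokGet "gotchas.md") 3)).insert "add_feature"
      (altTokGet "add-feature.md" + altTokGet "project-rules.md" + altTokGet "coding-standards.md"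
        + PySem.Int.floordiv (altTokGet "gotchas.md") 2)).insert "multi_subtask"
      (altTokGet "update-rules.md" + altTokGet "project-rules.md")).insert "other"
      (altTokGet "project-rules.md" + altTokGet "coding-standards.md"))

def session_with_compaction_alt (rounds : Int) (task_pattern : List String) : List (String × Int) :=
  let base := altTokGet "SKILL.md"
  let dflt := altTokGet "project-rules.md"
  let n : Int := task_pattern.length
  let thin_shell : Int := 80
  [("naive_total_tokens", altTok.values.sum * n),
   ("skill_total_tokens",
     (task_pattern.map (fun t => base + altExtras.getD t dflt)).sum + thin_shell * max 0 (n - 1)),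
   ("rounds", rounds)]

-- ===== PRECONDITION & SPEC =====
def Spec_session_with_compaction (rounds : Int) (task_pattern : List String) (out : List (String × Int)) : Prop := out = session_with_compaction_alt rounds task_pattern
instance (rounds : Int) (task_pattern : List String) (out : List (String × Int)) : Decidable (Spec_session_with_compaction rounds task_pattern out) := by unfold Spec_session_with_compaction; infer_instance

-- ===== CLAIM =====
def Claim_equal_session_with_compaction : Prop := ∀ (rounds : Int) (task_pattern : List String), Dom_session_with_compaction rounds task_pattern → Spec_session_with_compaction rounds task_pattern (session_with_compaction rounds task_pattern)

-- ===== LEMMAS AND PROOFS =====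
-- B's per-task cost equals A's skill_based_load, case by case on the four routed tasks
theorem altCost_eq (t : String) :
    altTokGet "SKILL.md" + altExtras.getD t (altTokGet "project-rules.md") = skillBasedLoad t := by
  by_cases h1 : t = "fix_bug"
  · subst h1; decide
  · by_cases h2 : t = "add_feature"
    · subst h2; decide
    · by_cases h3 : t = "multi_subtask"
      · subst h3; decide
      · by_cases h4 : t = "other"
        · subst h4; decide
        · simp only [skillBasedLoad, beq_iff_eq, if_neg h1, if_neg h2, if_neg h3, if_neg h4]
          rw [show altExtras.getD t (altTokGet "project-rules.md")
              = altTokGet "project-rules.md" from by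
            simp [altExtras, PySem.Dict.getD_insert, h1, h2, h3, h4]]
          decide

-- B's table sum equals A's naive_load_all
theorem altNaive_eq : altTok.values.sum = naiveLoadAll := by decide

-- once i ≠ 0 every remaining round adds naiveLoadAll and 80 + skillBasedLoad
theorem sessionLoop_pos (ts : List String) : ∀ (i naive skill : Int), 1 ≤ i →
    sessionLoop i (naive, skill) ts =
      (naive + naiveLoadAll * ts.length,
       skill + (ts.map skillBasedLoad).sum + 80 * ts.length) := by
  induction ts with
  | nil => intro i naive skill _; simp [sessionLoop]
  | cons t rest ih =>
      intro i naive skill hi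
      simp only [sessionLoop, beq_iff_eq, if_neg (by omega : i ≠ 0)]
      rw [ih (i + 1) _ _ (by omega)]
      simp [List.length_cons]
      constructor <;> ring

theorem session_with_compaction_eq (rounds : Int) (tp : List String) :
    session_with_compaction rounds tp = session_with_compaction_alt rounds tp := by
  cases tp with
  | nil =>
      simp [session_with_compaction, session_with_compaction_alt, sessionLoop]
  | cons t rest =>
      simp only [session_with_compaction, session_with_compaction_alt, sessionLoop,
        beq_self_eq_true, if_pos, List.map_cons, List.sum_cons]
      rw [sessionLoop_pos rest (0 + 1) _ _ (by omega)]
      rw [altNaive_eq]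
      simp only [List.length_cons, Nat.cast_add, Nat.cast_one]
      have h1' : altTokGet "SKILL.md" + altExtras.getD t (altTokGet "project-rules.md")
          = skillBasedLoad t := altCost_eq t
      have h2' : (rest.map (fun t => altTokGet "SKILL.md"
          + altExtras.getD t (altTokGet "project-rules.md"))).sum
          = (rest.map skillBasedLoad).sum := by
        rw [List.map_congr_left (fun x _ => altCost_eq x)]
      have hmax : max 0 (((rest.length : Int) + 1) - 1) = rest.length := by
        rw [max_eq_right] <;> omega
      rw [hmax, h1', h2']
      refine congrArg₂ (fun a b =>
        [("naive_total_tokens", a), ("skill_total_tokens", b), ("rounds", rounds)]) (by ring) (by ring)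

-- ===== VERDICT =====
theorem session_with_compaction_spec : Claim_equal_session_with_compaction := by
  intro rounds tp _
  exact session_with_compaction_eq rounds tp
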